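-- pv_equiv track=rewrite | github.com/sebkunze/ConstraintExplorer | core/object/parser.py | parse_string_in_parenthesis
-- ===== SOURCE A (Python) =====
-- def parse_string_in_parenthesis(string):
--     stack = []
--
--     s = []
--     for c in string:
--         if c == "[" and len(stack) is 0:
--             stack.append(c)
--
--         elif c == "[" and len(stack) > 0:
--             s.append(c)
--
--             stack.append(c)
--         elif c == "]" and len(stack) is 0:
--             return ""
--
--         elif c == "]" and len(stack) is 1:
--             break;
--
--         elif c == "]":
--             s.append(c)
--             stack.pop()
--
--         elif stack:
--             s.append(c)
--
--     return ''.join(s)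
-- ===== SOURCE B (Python) =====
-- def parse_string_in_parenthesis(string):
--     depth = 0
--     start = -1
--     for i, c in enumerate(string):
--         if c == "[":
--             if depth == 0:
--                 start = i
--             depth += 1
--         elif c == "]":
--             if depth == 0:
--                 return ""
--             depth -= 1
--             if depth == 0:
--                 return string[start + 1:i]
--     return string[start + 1:] if start >= 0 else ""
-- ===== Notes on version B (the rewrite author's own statement) =====
-- stated objective: simpler
-- what changed: Replaces A's explicit bracket stack and per-character accumulation list with an integer depth counter plus the index of the first opening bracket, returning one positional slice of the input instead of joining collected characters.
import Mathlib
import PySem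

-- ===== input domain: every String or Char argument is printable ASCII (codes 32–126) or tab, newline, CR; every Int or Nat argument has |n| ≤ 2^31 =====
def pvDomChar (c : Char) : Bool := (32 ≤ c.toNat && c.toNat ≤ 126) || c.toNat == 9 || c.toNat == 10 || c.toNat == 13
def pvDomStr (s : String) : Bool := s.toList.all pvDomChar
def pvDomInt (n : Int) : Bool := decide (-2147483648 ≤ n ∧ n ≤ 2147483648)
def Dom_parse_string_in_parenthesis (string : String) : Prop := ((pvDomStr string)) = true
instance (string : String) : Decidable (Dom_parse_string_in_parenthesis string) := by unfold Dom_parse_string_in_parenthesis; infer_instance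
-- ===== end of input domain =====

-- B replaces A's character-accumulation into a list with a depth counter plus one
-- positional slice of the input (objective: simpler).

-- ===== PORT A =====
-- literal transliteration of A's loop: state = (stack, s), branches in source order
def pvALoop : List Char → List Char → List Char → String
  | [], _stack, s => String.ofList s
  | c :: rest, stack, s =>
    if c = '[' ∧ stack.length = 0 then pvALoop rest (stack ++ [c]) s
    else if c = '[' ∧ stack.length > 0 then pvALoop rest (stack ++ [c]) (s ++ [c])
    else if c = ']' ∧ stack.length = 0 then ""
    else if c = ']' ∧ stack.length = 1 then String.ofList s
    else if c = ']' then pvALoop rest stack.dropLast (s ++ [c])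
    else if stack ≠ [] then pvALoop rest stack (s ++ [c])
    else pvALoop rest stack s

def parse_string_in_parenthesis (string : String) : String :=
  pvALoop string.toList [] []

-- ===== PORT B =====
-- literal transliteration of B's loop over enumerate(string): state = (depth, start)
def pvBLoop (cs : List Char) : List (Int × Char) → Int → Int → String
  | [], _depth, start =>
      if start ≥ 0 then String.ofList (PySem.List.slice cs (some (start + 1)) none) else ""
  | (i, c) :: rest, depth, start =>
      if c = '[' then pvBLoop cs rest (depth + 1) (if depth = 0 then i else start)
      else if c = ']' then
        if depth = 0 then ""
        else if depth - 1 = 0 then String.ofList (PySem.List.slice cs (some (start + 1)) (some i))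
        else pvBLoop cs rest (depth - 1) start
      else pvBLoop cs rest depth start

def parse_string_in_parenthesis_alt (string : String) : String :=
  pvBLoop string.toList (PySem.List.enumerate string.toList) 0 (-1)

-- ===== PRECONDITION & SPEC =====
def Spec_parse_string_in_parenthesis (string : String) (out : String) : Prop := out = parse_string_in_parenthesis_alt string
instance (string : String) (out : String) : Decidable (Spec_parse_string_in_parenthesis string out) := by unfold Spec_parse_string_in_parenthesis; infer_instance

-- ===== CLAIM (what is proved, stated in full; the proofs are below) =====
def Claim_equal_parse_string_in_parenthesis : Prop := ∀ (string : String), Dom_parse_string_in_parenthesis string → Spec_parse_string_in_parenthesis string (parse_string_in_parenthesis string)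

-- ===== LEMMAS AND PROOFS =====

-- appending the character at position k extends the slice-so-far by one
lemma take_drop_snoc (cs : List Char) (a k : Nat) (ha : a ≤ k) (hk : k < cs.length) :
    (cs.drop a).take (k - a) ++ [cs[k]] = (cs.drop a).take (k + 1 - a) := by
  have hlt : k - a < (cs.drop a).length := by simp [List.length_drop]; omega
  have hget : (cs.drop a)[k - a] = cs[k] := by
    rw [List.getElem_drop]
    congr 1
    omega
  have : (cs.drop a).take (k - a + 1) = (cs.drop a).take (k - a) ++ [(cs.drop a)[k - a]] := by
    rw [List.take_add_one]
    simp [List.getElem?_eq_getElem hlt]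
  rw [hget] at this
  have hidx : k + 1 - a = k - a + 1 := by omega
  rw [hidx, this]

-- loop invariant: A's (stack, s) vs B's (depth, start) at position k of cs
lemma loop_eq (rest : List Char) : ∀ (cs : List Char) (k : Nat) (stack s : List Char) (st : Int),
    rest = cs.drop k → k ≤ cs.length →
    (∀ x ∈ stack, x = '[') →
    (stack = [] → s = [] ∧ st = -1) →
    (stack ≠ [] → ∃ st' : Nat, st = (st' : Int) ∧ st' + 1 ≤ k ∧
        s = (cs.drop (st' + 1)).take (k - (st' + 1))) →
    pvALoop rest stack s = pvBLoop cs (PySem.List.enumerate rest (k : Int)) (stack.length : Int) st := by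
  induction rest with
  | nil =>
    intro cs k stack s st hrest hk _hall h0 h1
    have hklen : k = cs.length := by
      have := congrArg List.length hrest
      simp [List.length_drop] at this
      omega
    cases stack with
    | nil =>
      obtain ⟨hs, hst⟩ := h0 rfl
      subst hs hst
      simp [pvALoop, pvBLoop, PySem.List.enumerate]
    | cons x t =>
      obtain ⟨st', hst, hle, hs⟩ := h1 (by simp)
      subst hst
      have hge : (st' : Int) ≥ 0 := by positivity
      have hcast : (st' : Int) + 1 = ((st' + 1 : Nat) : Int) := by push_cast; ring
      simp only [pvALoop, pvBLoop, PySem.List.enumerate]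
      rw [if_pos hge, hcast, PySem.List.slice_from_natCast]
      congr 1
      rw [hs, hklen]
      exact List.take_of_length_le (by simp)
  | cons c rest' ih =>
    intro cs k stack s st hrest hk hall h0 h1
    have hklt : k < cs.length := by
      by_contra h
      have hnil : cs.drop k = [] := List.drop_eq_nil_of_le (by omega)
      rw [hnil] at hrest
      exact List.cons_ne_nil c rest' hrest
    have hck : cs[k] = c := by
      have h2 : (cs.drop k)[0]'(by rw [← hrest]; simp) = c := by
        simp [← hrest]
      rw [List.getElem_drop] at h2
      simpa using h2
    have hrest' : rest' = cs.drop (k + 1) := by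
      have := congrArg List.tail hrest
      simpa [List.tail_drop] using this
    rw [PySem.List.enumerate_cons]
    by_cases hc1 : c = '['
    · subst hc1
      cases stack with
      | nil =>
        obtain ⟨hs, hst⟩ := h0 rfl
        subst hs hst
        have hIH := ih cs (k + 1) ['['] [] (k : Int) (by simpa using hrest')
          (by omega) (by simp) (by simp)
          (by intro _; exact ⟨k, rfl, by omega, by simp⟩)
        simp only [pvALoop, pvBLoop]
        norm_num
        simpa using hIH
      | cons x t =>
        obtain ⟨st', hst, hle, hs⟩ := h1 (by simp)
        subst hst
        have hIH := ih cs (k + 1) ((x :: t) ++ ['[']) (s ++ ['[']) (st' : Int)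
          (by simpa using hrest') (by omega)
          (by intro y hy; rcases List.mem_append.1 hy with h | h
              · exact hall y (by simpa using h)
              · simpa using h)
          (by simp)
          (by intro _; exact ⟨st', rfl, by omega, by
                rw [hs, ← hck]; exact take_drop_snoc cs (st' + 1) k hle hklt⟩)
        simp only [pvALoop, pvBLoop]
        norm_num
        rw [if_neg (by omega)]
        simpa [add_comm] using hIH
    · by_cases hc2 : c = ']'
      · subst hc2
        cases stack with
        | nil =>
          simp only [pvALoop, pvBLoop]
          norm_num [hc1]
        | cons x t =>
          obtain ⟨st', hst, hle, hs⟩ := h1 (by simp)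
          subst hst
          cases t with
          | nil =>
            simp only [pvALoop, pvBLoop]
            norm_num [hc1]
            have hcast : (st' : Int) + 1 = ((st' + 1 : Nat) : Int) := by push_cast; ring
            rw [hcast, PySem.List.slice_natCast, hs]
          | cons y u =>
            have hIH := ih cs (k + 1) ((x :: y :: u).dropLast) (s ++ [']']) (st' : Int)
              (by simpa using hrest') (by omega)
              (by intro z hz; exact hall z (List.dropLast_subset _ hz))
              (by intro h; simp at h)
              (by intro _; exact ⟨st', rfl, by omega, by
                    rw [hs, ← hck]; exact take_drop_snoc cs (st' + 1) k hle hklt⟩)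
            simp only [pvALoop, pvBLoop]
            norm_num [hc1]
            simpa using hIH
      · cases stack with
        | nil =>
          obtain ⟨hs, hst⟩ := h0 rfl
          subst hs hst
          have hIH := ih cs (k + 1) [] [] (-1) (by simpa using hrest') (by omega)
            (by simp) (by simp) (by simp)
          simp only [pvALoop, pvBLoop]
          norm_num [hc1, hc2]
          simpa using hIH
        | cons x t =>
          obtain ⟨st', hst, hle, hs⟩ := h1 (by simp)
          subst hst
          have hIH := ih cs (k + 1) (x :: t) (s ++ [c]) (st' : Int)
            (by simpa using hrest') (by omega) hall (by simp)
            (by intro _; exact ⟨st', rfl, by omega, by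
                  rw [hs, ← hck]; exact take_drop_snoc cs (st' + 1) k hle hklt⟩)
          simp only [pvALoop, pvBLoop]
          norm_num [hc1, hc2]
          rw [if_neg (by simp)]
          simpa using hIH

-- ===== VERDICT (by name: the statement is the Claim_ definition above) =====
theorem parse_string_in_parenthesis_spec : Claim_equal_parse_string_in_parenthesis := by
  intro string _hdom
  unfold Spec_parse_string_in_parenthesis parse_string_in_parenthesis parse_string_in_parenthesis_alt
  have := loop_eq string.toList string.toList 0 [] [] (-1) (by simp) (by omega)
    (by simp) (by simp) (by simp)
  simpa using this
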